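-- pv_equiv track=rewrite | github.com/lalala2726/medicine-agent | app/agent/assistant/node/gateway_node.py | _normalize_route_targets
-- ===== SOURCE A (Python) =====
-- _ALLOWED_GATEWAY_TARGETS: tuple[str, ...] = (
--     "chat_agent",
--     "order_agent",
--     "product_agent",
--     "after_sale_agent",
--     "user_agent",
--     "analytics_agent",
-- )
--
-- def _normalize_route_targets(route_targets: list[str]) -> list[str]:
--     """
--     功能描述：
--         规范化网关路由目标数组并执行合法性校验。
--
--     参数说明：
--         route_targets (list[str]): 原始路由目标数组。
--
--     返回值：
--         list[str]:
--             规范化后的路由目标数组（顺序去重）。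
--             当出现非法值、空值或 chat 与业务域混合时返回空数组。
--
--     异常说明：
--         无；解析失败由调用方决定兜底策略。
--     """
--
--     normalized: list[str] = []
--     for raw_target in route_targets:
--         target = str(raw_target or "").strip()
--         if not target:
--             return []
--         if target not in _ALLOWED_GATEWAY_TARGETS:
--             return []
--         if target in normalized:
--             continue
--         normalized.append(target)
--
--     if not normalized:
--         return []
--     if "chat_agent" in normalized and len(normalized) > 1:
--         return []
--     return normalized
-- ===== SOURCE B (Python) =====
-- _ALLOWED_GATEWAY_TARGETS: tuple[str, ...] = (
--     "chat_agent",
--     "order_agent",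
--     "product_agent",
--     "after_sale_agent",
--     "user_agent",
--     "analytics_agent",
-- )
--
--
-- def _normalize_route_targets(route_targets: list[str]) -> list[str]:
--     """Encode each target to its integer code, dedup codes with a seen-bitmask, decode back."""
--     index_of = {name: i for i, name in enumerate(_ALLOWED_GATEWAY_TARGETS)}
--     codes = []
--     for raw in route_targets:
--         code = index_of.get(str(raw or "").strip())
--         if code is None:
--             return []
--         codes.append(code)
--     mask = 0
--     order = []
--     for code in codes:
--         if not (mask >> code) & 1:
--             mask |= 1 << code
--             order.append(code)
--     if not order:
--         return []
--     if 0 in order and len(order) > 1: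
--         return []
--     return [_ALLOWED_GATEWAY_TARGETS[code] for code in order]
-- ===== Notes on version B (the rewrite author's own statement) =====
-- stated objective: alternative
-- what changed: B compiles each target to its integer index in the allowed tuple via a prebuilt name->index dict (validation = lookup failure), deduplicates the integer codes with a seen-bitmask instead of a membership scan over the accumulator, applies the guards on the code list, and decodes the codes back to names at the end.
import Mathlib
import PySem

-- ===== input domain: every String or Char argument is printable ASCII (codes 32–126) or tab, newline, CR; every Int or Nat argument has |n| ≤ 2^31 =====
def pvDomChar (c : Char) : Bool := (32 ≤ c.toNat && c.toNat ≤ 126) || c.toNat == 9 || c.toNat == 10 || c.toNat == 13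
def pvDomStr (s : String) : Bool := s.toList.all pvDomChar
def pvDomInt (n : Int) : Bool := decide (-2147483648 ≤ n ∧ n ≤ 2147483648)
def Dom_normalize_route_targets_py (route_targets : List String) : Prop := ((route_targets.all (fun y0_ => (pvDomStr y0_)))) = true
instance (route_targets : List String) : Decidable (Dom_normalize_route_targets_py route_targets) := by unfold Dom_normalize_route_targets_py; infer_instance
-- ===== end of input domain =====

-- B compiles each target to its integer index in the allowed tuple via a name->index dict
-- (validation = lookup failure), dedups the codes with a seen-bitmask, and decodes back at the end,
-- instead of A's single string loop with a membership scan over the accumulator (objective: alternative).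


-- ===== PORT A =====
def pvAllowed : List String :=
  ["chat_agent", "order_agent", "product_agent", "after_sale_agent", "user_agent", "analytics_agent"]

-- A's loop: early return [] on empty/illegal target, skip duplicates, else append; final guards at the end.
-- (Python's `str(raw or "").strip()` on a str argument equals raw.strip(): `raw or ""` is raw unless raw == "", and "".strip() == "".)
def pvGoA : List String → List String → List String
  | [], normalized =>
      if normalized = [] then []
      else if normalized.contains "chat_agent" && decide (normalized.length > 1) then []
      else normalized
  | raw :: rest, normalized =>
      let target := PySem.Str.strip raw
      if target = "" then []
      else if !(pvAllowed.contains target) then []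
      else if normalized.contains target then pvGoA rest normalized
      else pvGoA rest (normalized ++ [target])

def normalize_route_targets_py (route_targets : List String) : List String :=
  pvGoA route_targets []

-- ===== PORT B =====
-- index_of = {name: i for i, name in enumerate(_ALLOWED_GATEWAY_TARGETS)}  (indices as Nat codes)
def pvIndexOf : PySem.Dict String Nat :=
  PySem.Dict.ofList (((List.range pvAllowed.length).zip pvAllowed).map (fun p => (p.2, p.1)))

-- first loop of B: encode each stripped target via the dict; None -> early return [] (modelled by Option)
def pvCodesLoop : List String → List Nat → Option (List Nat)
  | [], codes => some codes
  | raw :: rest, codes =>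
      match PySem.Dict.get? pvIndexOf (PySem.Str.strip raw) with
      | none => none
      | some c => pvCodesLoop rest (codes ++ [c])

-- second loop of B: dedup codes with a seen-bitmask
def pvDedupLoop : List Nat → Nat → List Nat → List Nat
  | [], _, order => order
  | c :: rest, mask, order =>
      if (mask >>> c) &&& 1 = 0 then pvDedupLoop rest (mask ||| (1 <<< c)) (order ++ [c])
      else pvDedupLoop rest mask order

def normalize_route_targets_py_alt (route_targets : List String) : List String :=
  match pvCodesLoop route_targets [] with
  | none => []
  | some codes =>
      let order := pvDedupLoop codes 0 []
      if order = [] then []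
      else if order.contains 0 && decide (order.length > 1) then []
      else order.map (fun c => PySem.List.pyGetD pvAllowed (Int.ofNat c) "")

-- ===== PRECONDITION & SPEC =====
def Spec_normalize_route_targets_py (route_targets : List String) (out : List String) : Prop := out = normalize_route_targets_py_alt route_targets
instance (route_targets : List String) (out : List String) : Decidable (Spec_normalize_route_targets_py route_targets out) := by unfold Spec_normalize_route_targets_py; infer_instance

-- ===== CLAIM (what is proved, stated in full; the proofs are below) =====
def Claim_equal_normalize_route_targets_py : Prop := ∀ (route_targets : List String), Dom_normalize_route_targets_py route_targets → Spec_normalize_route_targets_py route_targets (normalize_route_targets_py route_targets)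

-- ===== LEMMAS AND PROOFS =====

-- decode a code back to its name
def pvDecode (c : Nat) : String := PySem.List.pyGetD pvAllowed (c : Int) ""

-- final guards, shared shape of both algorithms' tails
def pvFinal (normalized : List String) : List String :=
  if normalized = [] then []
  else if normalized.contains "chat_agent" && decide (normalized.length > 1) then []
  else normalized

lemma pvGoA_eq (l : List String) : ∀ (acc : List String),
    pvGoA l acc =
      if (l.map (fun t => PySem.Str.strip t)).any (fun t => !(pvAllowed.contains t)) then []
      else pvFinal ((l.map (fun t => PySem.Str.strip t)).foldl PySem.Set.add acc) := by
  induction l with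
  | nil => intro acc; simp [pvGoA, pvFinal]
  | cons raw rest ih =>
    intro acc
    simp only [List.map_cons, List.any_cons, List.foldl_cons, pvGoA]
    by_cases h0 : PySem.Str.strip raw = ""
    · simp only [h0]
      simp
      intro h _
      exact absurd h (by decide)
    · simp only [if_neg h0]
      by_cases hA : pvAllowed.contains (PySem.Str.strip raw)
      · simp only [hA, Bool.not_true, Bool.false_or, Bool.false_eq_true, if_false]
        by_cases hm : acc.contains (PySem.Str.strip raw)
        · rw [if_pos hm, ih acc, PySem.Set.add_of_mem (by simpa using hm)]
        · rw [if_neg hm, ih (acc ++ [PySem.Str.strip raw]),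
            PySem.Set.add_of_not_mem (by simpa using hm)]
      · have hA' : PySem.Str.strip raw ∉ pvAllowed := by simpa using hA
        simp [hA']

-- dict lookup characterisation (the dict is a 6-entry literal)
lemma pvLookup_none {t : String} (h : t ∉ pvAllowed) : PySem.Dict.get? pvIndexOf t = none := by
  have h1 : t ≠ "chat_agent" := by rintro rfl; exact h (by decide)
  have h2 : t ≠ "order_agent" := by rintro rfl; exact h (by decide)
  have h3 : t ≠ "product_agent" := by rintro rfl; exact h (by decide)
  have h4 : t ≠ "after_sale_agent" := by rintro rfl; exact h (by decide)
  have h5 : t ≠ "user_agent" := by rintro rfl; exact h (by decide)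
  have h6 : t ≠ "analytics_agent" := by rintro rfl; exact h (by decide)
  show PySem.Dict.get? (PySem.Dict.mk [("chat_agent", 0), ("order_agent", 1), ("product_agent", 2),
    ("after_sale_agent", 3), ("user_agent", 4), ("analytics_agent", 5)]) t = none
  simp [Ne.symm h1, Ne.symm h2, Ne.symm h3, Ne.symm h4, Ne.symm h5, Ne.symm h6,
    PySem.Dict.get?]

lemma pvLookup_mem {t : String} (h : t ∈ pvAllowed) :
    ∃ c, PySem.Dict.get? pvIndexOf t = some c ∧ c < 6 ∧ pvDecode c = t := by
  fin_cases h
  · exact ⟨0, by decide, by decide, by decide⟩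
  · exact ⟨1, by decide, by decide, by decide⟩
  · exact ⟨2, by decide, by decide, by decide⟩
  · exact ⟨3, by decide, by decide, by decide⟩
  · exact ⟨4, by decide, by decide, by decide⟩
  · exact ⟨5, by decide, by decide, by decide⟩

lemma pvDecode_inj : ∀ c < 6, ∀ c' < 6, pvDecode c = pvDecode c' → c = c' := by decide

lemma pvDecode_chat : ∀ c < 6, (pvDecode c = "chat_agent" ↔ c = 0) := by decide

-- the encode loop = validate-all + map-to-codes
lemma pvCodesLoop_eq (l : List String) : ∀ acc,
    pvCodesLoop l acc =
      if (l.map (fun t => PySem.Str.strip t)).any (fun t => !(pvAllowed.contains t)) then none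
      else some (acc ++ (l.map (fun t => PySem.Str.strip t)).map
        (fun t => (PySem.Dict.get? pvIndexOf t).getD 0)) := by
  induction l with
  | nil => intro acc; simp [pvCodesLoop]
  | cons raw rest ih =>
    intro acc
    by_cases hA : PySem.Str.strip raw ∈ pvAllowed
    · obtain ⟨c, hc, _, _⟩ := pvLookup_mem hA
      have hcon : pvAllowed.contains (PySem.Str.strip raw) = true := by simpa using hA
      simp only [pvCodesLoop, hc, ih (acc ++ [c]), List.map_cons, List.any_cons, hcon,
        Bool.not_true, Bool.false_or]
      split_ifs with h
      · rfl
      · simp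
    · have hcon : pvAllowed.contains (PySem.Str.strip raw) = false := by simpa using hA
      simp only [pvCodesLoop, pvLookup_none hA, List.map_cons, List.any_cons, hcon]
      simp

lemma pvBit_iff (m c : Nat) : ((m >>> c) &&& 1 = 0) ↔ m.testBit c = false := by
  simp [Nat.testBit, Nat.and_one_is_mod]

-- the bitmask dedup loop, under the mask↔order invariant, is Set.add folding after decoding
lemma pvDedupLoop_eq : ∀ (codes : List Nat) (mask : Nat) (order : List Nat),
    (∀ c ∈ codes, c < 6) → (∀ c ∈ order, c < 6) →
    (∀ c, c < 6 → (mask.testBit c = true ↔ c ∈ order)) →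
    (pvDedupLoop codes mask order).map pvDecode =
      (codes.map pvDecode).foldl PySem.Set.add (order.map pvDecode)
    ∧ ∀ c ∈ pvDedupLoop codes mask order, c < 6 := by
  intro codes
  induction codes with
  | nil => intro mask order _ hord _; exact ⟨by simp [pvDedupLoop], by simpa [pvDedupLoop] using hord⟩
  | cons c rest ih =>
    intro mask order hcodes hord hinv
    have hc6 : c < 6 := hcodes c (by simp)
    have hrest : ∀ x ∈ rest, x < 6 := fun x hx => hcodes x (by simp [hx])
    have hmem_iff : pvDecode c ∈ order.map pvDecode ↔ c ∈ order := by
      constructor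
      · rintro h
        obtain ⟨c', hc', he⟩ := List.mem_map.mp h
        have := pvDecode_inj c' (hord c' hc') c hc6 he
        rwa [this] at hc'
      · intro h; exact List.mem_map_of_mem h
    simp only [pvDedupLoop, List.map_cons, List.foldl_cons]
    by_cases hb : (mask >>> c) &&& 1 = 0
    · have hnotin : c ∉ order := by
        intro h
        have := (hinv c hc6).mpr h
        rw [(pvBit_iff mask c).mp hb] at this; exact absurd this (by simp)
      have hset : PySem.Set.add (order.map pvDecode) (pvDecode c) = order.map pvDecode ++ [pvDecode c] :=
        PySem.Set.add_of_not_mem (fun h => hnotin (hmem_iff.mp h))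
      rw [if_pos hb, hset]
      have hord' : ∀ x ∈ order ++ [c], x < 6 := by
        intro x hx; rcases List.mem_append.mp hx with h | h
        · exact hord x h
        · simp at h; omega
      have hinv' : ∀ x, x < 6 → ((mask ||| (1 <<< c)).testBit x = true ↔ x ∈ order ++ [c]) := by
        intro x hx
        rw [Nat.testBit_or, Nat.testBit_shiftLeft]
        simp only [List.mem_append, List.mem_singleton]
        constructor
        · intro h
          rcases Bool.or_eq_true_iff.mp h with h | h
          · exact Or.inl ((hinv x hx).mp h)
          · right
            have h1 := Bool.and_eq_true_iff.mp h
            have : x - c = 0 := Nat.testBit_one_eq_true_iff_self_eq_zero.mp h1.2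
            have : c ≤ x := by simpa using h1.1
            omega
        · rintro (h | rfl)
          · simp [(hinv x hx).mpr h]
          · simp
      have := ih (mask ||| (1 <<< c)) (order ++ [c]) hrest hord' hinv'
      simpa [List.map_append] using this
    · have hin : c ∈ order := by
        have ht : mask.testBit c = true := by
          rcases Bool.eq_false_or_eq_true (mask.testBit c) with h | h
          · exact h
          · exact absurd ((pvBit_iff mask c).mpr h) hb
        exact (hinv c hc6).mp ht
      have hset : PySem.Set.add (order.map pvDecode) (pvDecode c) = order.map pvDecode :=
        PySem.Set.add_of_mem (hmem_iff.mpr hin)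
      rw [if_neg hb, hset]
      exact ih mask order hrest hord hinv

theorem normalize_route_targets_py_spec_aux (route_targets : List String) :
    normalize_route_targets_py route_targets = normalize_route_targets_py_alt route_targets := by
  unfold normalize_route_targets_py normalize_route_targets_py_alt
  rw [pvGoA_eq route_targets [], pvCodesLoop_eq route_targets []]
  by_cases hbad : ((route_targets.map (fun t => PySem.Str.strip t)).any
      (fun t => !(pvAllowed.contains t))) = true
  · rw [if_pos hbad, if_pos hbad]
  · rw [if_neg hbad, if_neg hbad]
    set cleaned := route_targets.map (fun t => PySem.Str.strip t) with hcl
    have hallmem : ∀ t ∈ cleaned, t ∈ pvAllowed := by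
      intro t ht
      by_contra h
      exact hbad (List.any_eq_true.mpr ⟨t, ht, by simpa using h⟩)
    simp only [List.nil_append]
    set codes := cleaned.map (fun t => (PySem.Dict.get? pvIndexOf t).getD 0) with hcodes
    have hdec : codes.map pvDecode = cleaned := by
      rw [hcodes, List.map_map]
      conv_rhs => rw [← List.map_id cleaned]
      exact List.map_congr_left (fun t ht => by
        obtain ⟨c, hc, _, hd⟩ := pvLookup_mem (hallmem t ht)
        simp [Function.comp, hc, hd])
    have hlt : ∀ c ∈ codes, c < 6 := by
      intro c hc
      obtain ⟨t, ht, he⟩ := List.mem_map.mp hc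
      obtain ⟨c', hc', hlt', _⟩ := pvLookup_mem (hallmem t ht)
      rw [hc'] at he; simp at he; omega
    obtain ⟨hmap, hlt'⟩ := pvDedupLoop_eq codes 0 [] hlt (by simp) (by simp)
    rw [hdec] at hmap
    set order := pvDedupLoop codes 0 [] with horder
    simp only [List.map_nil] at hmap
    set deduped := cleaned.foldl PySem.Set.add [] with hded
    -- final guards correspond through pvDecode
    have hchat : (0 ∈ order) ↔ ("chat_agent" ∈ deduped) := by
      rw [← hmap]
      constructor
      · intro h; exact List.mem_map.mpr ⟨0, h, by decide⟩
      · intro h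
        obtain ⟨c, hc, he⟩ := List.mem_map.mp h
        rwa [← (pvDecode_chat c (hlt' c hc)).mp he]
    have hlen : order.length = deduped.length := by rw [← hmap]; simp
    unfold pvFinal
    by_cases h1 : order = []
    · have hd1 : deduped = [] := by rw [← hmap, h1]; rfl
      rw [if_pos hd1, if_pos h1]
    · have hne : deduped ≠ [] := by
        rw [← hmap]; simpa using h1
      rw [if_neg hne, if_neg h1]
      by_cases h2 : 0 ∈ order ∧ order.length > 1
      · have hd2 : (1 : Nat) < List.length deduped := by omega
        rw [if_pos (by
              simp only [List.contains_eq_mem, Bool.and_eq_true, decide_eq_true_eq]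
              exact ⟨hchat.mp h2.1, hd2⟩),
            if_pos (by
              simp only [List.contains_eq_mem, Bool.and_eq_true, decide_eq_true_eq]
              exact ⟨h2.1, h2.2⟩)]
      · rw [if_neg, if_neg]
        · exact hmap.symm
        · intro h
          simp only [List.contains_eq_mem, Bool.and_eq_true, decide_eq_true_eq] at h
          exact h2 h
        · intro h
          simp only [List.contains_eq_mem, Bool.and_eq_true, decide_eq_true_eq] at h
          exact h2 ⟨hchat.mpr h.1, by omega⟩

-- ===== VERDICT (by name: the statement is the Claim_ definition above) =====
theorem normalize_route_targets_py_spec : Claim_equal_normalize_route_targets_py := by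
  intro rt _
  exact normalize_route_targets_py_spec_aux rt
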